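-- pv_equiv track=rewrite | github.com/koolerjaebee/generativeAI-openai | main.py | extract_tables_from_markdown_with_labels
-- ===== SOURCE A (Python) =====
-- def extract_tables_from_markdown_with_labels(markdown_text, label_position='before'):
--     lines = markdown_text.split('\n')
--     tables_with_labels = []
--     table = []
--     label = ""
--     in_table = False
--     after_label = ""  # 'after' 라벨을 위한 변수
--
--     for line in lines:
--         if line.strip() == '' and not in_table:
--             continue
--         if '|' in line and not in_table:
--             in_table = True
--             if label_position == 'before':
--                 table.append(label)  # 라벨을 테이블 앞에 추가
--             table.append(line)
--             label = ""  # 라벨 초기화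
--         elif '|' in line and in_table:
--             table.append(line)
--         elif '|' not in line and in_table:
--             in_table = False
--             if label_position == 'after' and after_label:
--                 table.append(after_label)  # 라벨을 테이블 뒤에 추가
--             tables_with_labels.append('\n'.join(table))
--             table = []
--             after_label = ""  # 'after' 라벨 초기화
--         else:
--             if in_table and label_position == 'after':
--                 after_label = line  # 테이블 뒤의 첫 번째 라인을 라벨로 저장
--             else:
--                 label = line  # 테이블 앞의 마지막 라인을 라벨로 저장
--
--     if table:
--         if label_position == 'after' and after_label:
--             table.append(after_label)  # 마지막 테이블에 대해 라벨을 뒤에 추가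
--         tables_with_labels.append('\n'.join(table))
--
--     return tables_with_labels
-- ===== SOURCE B (Python) =====
-- def extract_tables_from_markdown_with_labels(markdown_text, label_position='before'):
--     lines = markdown_text.split('\n')
--     n = len(lines)
--     result = []
--     gap_start = 0
--     while True:
--         i = gap_start
--         while i < n and '|' not in lines[i]:
--             i += 1
--         if i >= n:
--             return result
--         label = ""
--         for ln in lines[gap_start:i]:
--             if ln.strip() != '':
--                 label = ln
--         j = i
--         while j < n and '|' in lines[j]:
--             j += 1
--         block = lines[i:j]
--         if label_position == 'before':
--             block = [label] + block
--         result.append('\n'.join(block))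
--         gap_start = j + 1  # the line at j (if any) terminated the table; it never labels the next one
-- ===== Notes on version B (the rewrite author's own statement) =====
-- stated objective: simpler
-- what changed: Replaced A's one-pass boolean state machine (in_table flag, label/after_label registers, dead 'after' branches) with run-scanning: repeatedly skip the non-'|' gap (its last non-blank line is the label), take the maximal '|'-run as the table, emit it, and skip the terminator line.
import Mathlib
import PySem

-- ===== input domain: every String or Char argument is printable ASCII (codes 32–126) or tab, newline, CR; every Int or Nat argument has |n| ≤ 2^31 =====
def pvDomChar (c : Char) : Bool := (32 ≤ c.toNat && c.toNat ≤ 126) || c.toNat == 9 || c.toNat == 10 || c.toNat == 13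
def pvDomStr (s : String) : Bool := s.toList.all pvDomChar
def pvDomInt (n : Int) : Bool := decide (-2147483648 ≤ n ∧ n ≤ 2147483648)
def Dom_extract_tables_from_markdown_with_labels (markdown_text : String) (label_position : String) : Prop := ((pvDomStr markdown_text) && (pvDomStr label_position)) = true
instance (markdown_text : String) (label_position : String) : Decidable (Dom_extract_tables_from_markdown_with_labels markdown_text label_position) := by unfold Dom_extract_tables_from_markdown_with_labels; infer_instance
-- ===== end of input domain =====

-- B re-groups the lines by run-scanning (takeWhile/dropWhile over '|'-runs) instead of A's
-- one-pass boolean state machine; objective: simpler decomposition, same exact output.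

-- ===== PORT A =====
-- state = (tables_with_labels, table, label, in_table, after_label), exactly A's variables
def pvA_step (label_position : String)
    (st : List String × List String × String × Bool × String) (line : String) :
    List String × List String × String × Bool × String :=
  let (tables, table, label, in_table, after_label) := st
  if PySem.Str.strip line = "" ∧ in_table = false then
    (tables, table, label, in_table, after_label)          -- continue
  else if PySem.Str.isIn "|" line = true ∧ in_table = false then
    let table := if label_position = "before" then table ++ [label] else table
    (tables, table ++ [line], "", true, after_label)
  else if PySem.Str.isIn "|" line = true ∧ in_table = true then
    (tables, table ++ [line], label, in_table, after_label)
  else if PySem.Str.isIn "|" line = false ∧ in_table = true then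
    let table := if label_position = "after" ∧ after_label ≠ "" then table ++ [after_label] else table
    (tables ++ [PySem.Str.join "\n" table], [], label, false, "")
  else
    if in_table = true ∧ label_position = "after" then
      (tables, table, label, in_table, line)
    else
      (tables, table, line, in_table, after_label)

def extract_tables_from_markdown_with_labels (markdown_text : String) (label_position : String) : List String :=
  let lines := (PySem.Str.split? markdown_text "\n").getD []   -- sep "\n" ≠ "": never none
  let (tables, table, _label, _in_table, after_label) :=
    lines.foldl (pvA_step label_position) ([], [], "", false, "")
  if table ≠ [] then
    let table := if label_position = "after" ∧ after_label ≠ "" then table ++ [after_label] else table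
    tables ++ [PySem.Str.join "\n" table]
  else
    tables

-- ===== PORT B =====
-- Source B's inner loops: scan the non-'|' gap (its for-loop computes the label over the gap),
-- then the '|' run, emit, skip the terminator line, repeat.
def pvB_hasBar (l : String) : Bool := PySem.Str.isIn "|" l

def pvB_label (gap : List String) : String :=
  gap.foldl (fun lab ln => if PySem.Str.strip ln = "" then lab else ln) ""

def pvB_go (label_position : String) (lines : List String) : List String :=
  match hrest : lines.dropWhile (fun l => ! pvB_hasBar l) with
  | [] => []
  | r :: rs =>
    let gap := lines.takeWhile (fun l => ! pvB_hasBar l)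
    let block := (r :: rs).takeWhile pvB_hasBar
    let rest2 := (r :: rs).dropWhile pvB_hasBar
    let block' := if label_position = "before" then pvB_label gap :: block else block
    PySem.Str.join "\n" block' :: pvB_go label_position rest2.tail
termination_by lines.length
decreasing_by
  have h0 : rs.length + 1 ≤ lines.length := by
    have h := List.length_dropWhile_le (fun l => ! pvB_hasBar l) lines
    rw [hrest] at h; simpa using h
  have h1 := List.length_dropWhile_le pvB_hasBar (r :: rs)
  have h2 : (List.dropWhile pvB_hasBar (r :: rs)).tail.length ≤ rs.length := by
    cases hd : List.dropWhile pvB_hasBar (r :: rs) with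
    | nil => simp
    | cons a as => rw [hd] at h1; simpa using h1
  omega

def extract_tables_from_markdown_with_labels_alt (markdown_text : String) (label_position : String) : List String :=
  pvB_go label_position ((PySem.Str.split? markdown_text "\n").getD [])

-- ===== PRECONDITION & SPEC =====
def Spec_extract_tables_from_markdown_with_labels (markdown_text : String) (label_position : String) (out : List String) : Prop := out = extract_tables_from_markdown_with_labels_alt markdown_text label_position
instance (markdown_text : String) (label_position : String) (out : List String) : Decidable (Spec_extract_tables_from_markdown_with_labels markdown_text label_position out) := by unfold Spec_extract_tables_from_markdown_with_labels; infer_instance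

-- ===== CLAIM (what is proved, stated in full; the proofs are below) =====
def Claim_equal_extract_tables_from_markdown_with_labels : Prop := ∀ (markdown_text : String) (label_position : String), Dom_extract_tables_from_markdown_with_labels markdown_text label_position → Spec_extract_tables_from_markdown_with_labels markdown_text label_position (extract_tables_from_markdown_with_labels markdown_text label_position)

-- ===== LEMMAS AND PROOFS =====

-- a line containing '|' does not strip to ""
lemma pvBar_strip_ne (l : String) (h : PySem.Str.isIn "|" l = true) : PySem.Str.strip l ≠ "" := by
  intro hstrip
  have hmem : '|' ∈ l.toList := by
    obtain ⟨s, t, hst⟩ := (PySem.Str.isIn_iff_infix "|" l).mp h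
    rw [← hst]; simp [show ("|" : String).toList = ['|'] from rfl]
  have h1 : PySem.Chars.strip l.toList = [] := by
    rw [← PySem.Str.toList_strip, hstrip]; rfl
  unfold PySem.Chars.strip PySem.Chars.rstrip PySem.Chars.lstrip at h1
  have h2 : ∀ x ∈ (List.dropWhile PySem.Chars.isspace l.toList).reverse,
      PySem.Chars.isspace x = true := by
    rw [← List.dropWhile_eq_nil_iff]
    simpa using h1
  have hsplit := List.takeWhile_append_dropWhile (p := PySem.Chars.isspace) (l := l.toList)
  rw [← hsplit] at hmem
  rcases List.mem_append.mp hmem with hm | hm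
  · exact absurd (List.mem_takeWhile_imp hm) (by decide)
  · exact absurd (h2 '|' (by simpa using hm)) (by decide)

-- A's finalization, as a function of the final state
def pvA_post (label_position : String)
    (st : List String × List String × String × Bool × String) : List String :=
  let (tables, table, _label, _in_table, after_label) := st
  if table ≠ [] then
    let table := if label_position = "after" ∧ after_label ≠ "" then table ++ [after_label] else table
    tables ++ [PySem.Str.join "\n" table]
  else
    tables

-- single-step characterizations of A's state machine
lemma pvA_step_gap_blank (lp l : String) (tables : List String) (label : String)
    (hs : PySem.Str.strip l = "") :
    pvA_step lp (tables, [], label, false, "") l = (tables, [], label, false, "") := by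
  simp only [pvA_step]
  split_ifs <;> simp_all

lemma pvA_step_gap_label (lp l : String) (tables : List String) (label : String)
    (hs : ¬ PySem.Str.strip l = "") (hl : PySem.Str.isIn "|" l = false) :
    pvA_step lp (tables, [], label, false, "") l = (tables, [], l, false, "") := by
  simp only [pvA_step]
  split_ifs <;> simp_all

lemma pvA_step_start (lp l : String) (tables : List String) (label : String)
    (hl : PySem.Str.isIn "|" l = true) :
    pvA_step lp (tables, [], label, false, "") l =
      (tables, (if lp = "before" then [label] else []) ++ [l], "", true, "") := by
  have hs := pvBar_strip_ne l hl
  simp only [pvA_step]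
  split_ifs <;> simp_all

lemma pvA_step_append (lp l : String) (tables tbl : List String)
    (hl : PySem.Str.isIn "|" l = true) :
    pvA_step lp (tables, tbl, "", true, "") l = (tables, tbl ++ [l], "", true, "") := by
  simp only [pvA_step]
  split_ifs <;> simp_all

lemma pvA_step_close (lp l : String) (tables tbl : List String)
    (hl : PySem.Str.isIn "|" l = false) :
    pvA_step lp (tables, tbl, "", true, "") l =
      (tables ++ [PySem.Str.join "\n" tbl], [], "", false, "") := by
  simp only [pvA_step]
  split_ifs <;> simp_all

-- folding A's step over a gap (no '|' anywhere) from a not-in-table state only updates the label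
lemma pvA_gap (lp : String) (gap : List String) (h : ∀ l ∈ gap, pvB_hasBar l = false) :
    ∀ tables label,
    gap.foldl (pvA_step lp) (tables, [], label, false, "") =
      (tables, [], gap.foldl (fun lab ln => if PySem.Str.strip ln = "" then lab else ln) label, false, "") := by
  induction gap with
  | nil => intro tables label; simp
  | cons l gs ih =>
    intro tables label
    have hl : PySem.Str.isIn "|" l = false := by simpa [pvB_hasBar] using h l (by simp)
    have hgs : ∀ x ∈ gs, pvB_hasBar x = false := fun x hx => h x (by simp [hx])
    simp only [List.foldl_cons]
    by_cases hs : PySem.Str.strip l = ""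
    · rw [pvA_step_gap_blank lp l tables label hs, ih hgs]; simp [hs]
    · rw [pvA_step_gap_label lp l tables label hs hl, ih hgs]; simp [hs]

-- folding A's step over the tail of a '|'-run keeps appending to the open table
lemma pvA_run (lp : String) (bs : List String) (h : ∀ l ∈ bs, pvB_hasBar l = true) :
    ∀ tables tbl,
    bs.foldl (pvA_step lp) (tables, tbl, "", true, "") =
      (tables, tbl ++ bs, "", true, "") := by
  induction bs with
  | nil => intro tables tbl; simp
  | cons b bs ih =>
    intro tables tbl
    have hb : PySem.Str.isIn "|" b = true := by simpa [pvB_hasBar] using h b (by simp)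
    have hbs : ∀ x ∈ bs, pvB_hasBar x = true := fun x hx => h x (by simp [hx])
    simp only [List.foldl_cons]
    rw [pvA_step_append lp b tables tbl hb, ih hbs]; simp

lemma pvB_go_nil (lp : String) : pvB_go lp [] = [] := by rw [pvB_go]; rfl

-- main induction: A's loop from a fresh gap state computes tables ++ pvB_go lp lines
lemma pvA_eq_pvB_go (lp : String) : ∀ n (lines : List String), lines.length ≤ n → ∀ tables,
    pvA_post lp (lines.foldl (pvA_step lp) (tables, [], "", false, "")) =
      tables ++ pvB_go lp lines := by
  intro n
  induction n with
  | zero =>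
    intro lines hl tables
    have : lines = [] := List.eq_nil_of_length_eq_zero (Nat.le_zero.mp hl)
    subst this
    rw [pvB_go]; simp [pvA_post]
  | succ n ih =>
    intro lines hl tables
    have hgapmem : ∀ l ∈ lines.takeWhile (fun l => ! pvB_hasBar l), pvB_hasBar l = false := by
      intro l hm
      simpa using List.mem_takeWhile_imp hm
    have hsplit := List.takeWhile_append_dropWhile (p := fun l => ! pvB_hasBar l) (l := lines)
    rw [pvB_go]
    cases hrest : lines.dropWhile (fun l => ! pvB_hasBar l) with
    | nil =>
      conv_lhs => rw [← hsplit, hrest]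
      rw [List.append_nil, pvA_gap lp _ hgapmem]
      simp [pvA_post]
    | cons r rs =>
      have hbarr : pvB_hasBar r = true := by
        have := List.head_dropWhile_not (fun l => ! pvB_hasBar l) (l := lines) (by simp [hrest])
        simpa [hrest] using this
      have hblockmem : ∀ l ∈ rs.takeWhile pvB_hasBar, pvB_hasBar l = true :=
        fun l hm => List.mem_takeWhile_imp hm
      have hrssplit := List.takeWhile_append_dropWhile (p := pvB_hasBar) (l := rs)
      conv_lhs => rw [← hsplit, hrest]
      rw [List.foldl_append, pvA_gap lp _ hgapmem]
      simp only [List.foldl_cons]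
      rw [pvA_step_start lp r tables _ (by simpa [pvB_hasBar] using hbarr)]
      conv_lhs => rw [← hrssplit]
      rw [List.foldl_append, pvA_run lp _ hblockmem]
      have hlen : rs.length + 1 ≤ lines.length := by
        have h := List.length_dropWhile_le (fun l => ! pvB_hasBar l) lines
        rw [hrest] at h; simpa using h
      cases hrest2 : rs.dropWhile pvB_hasBar with
      | nil =>
        have htake : rs.takeWhile pvB_hasBar = rs := by
          rw [hrest2] at hrssplit; simpa using hrssplit
        simp only [List.foldl_nil, List.takeWhile_cons, List.dropWhile_cons, hbarr,
          htake, hrest2]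
        by_cases hbf : lp = "before" <;> simp [hbf, pvA_post, pvB_go_nil, pvB_label]
      | cons t ts =>
        have hbart : PySem.Str.isIn "|" t = false := by
          have := List.head_dropWhile_not pvB_hasBar (l := rs) (by simp [hrest2])
          simpa [hrest2, pvB_hasBar] using this
        have hts : ts.length ≤ n := by
          have hlen2 : (rs.takeWhile pvB_hasBar).length + (t :: ts).length = rs.length := by
            rw [← hrest2, ← List.length_append, hrssplit]
          simp only [List.length_cons] at hlen2
          omega
        simp only [List.foldl_cons]
        rw [pvA_step_close lp t _ _ hbart]
        rw [ih ts hts]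
        simp only [List.takeWhile_cons, List.dropWhile_cons, hbarr, hrest2]
        by_cases hbf : lp = "before" <;> simp [hbf, pvB_label]

-- ===== VERDICT (by name: the statement is the Claim_ definition above) =====
theorem extract_tables_from_markdown_with_labels_spec : Claim_equal_extract_tables_from_markdown_with_labels := by
  intro markdown_text lp _
  unfold Spec_extract_tables_from_markdown_with_labels
  unfold extract_tables_from_markdown_with_labels extract_tables_from_markdown_with_labels_alt
  have := pvA_eq_pvB_go lp ((PySem.Str.split? markdown_text "\n").getD []).length
    ((PySem.Str.split? markdown_text "\n").getD []) le_rfl []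
  simpa [pvA_post] using this
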